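-- pv_equiv track=rewrite | github.com/gabepen/mimic_screen | src/auto_lit_search/collect.py | _pubtype_is_excluded
-- ===== SOURCE A (Python) =====
-- from typing import Any, Dict, Iterable, List, Optional, Tuple
--
-- _EXCLUDED_PUBTYPE_SUBSTRINGS: List[str] = [
--     # Notices/corrections that are not the underlying research article.
--     "expression-of-concern",
--     "retraction",
--     "correction",
--     "erratum",
--     "corrigendum",
--     "withdrawn",
--     # Editorial-ish / non-research pieces.
--     "comment",
--     "editorial",
--     "letter",
--     "abstract",
--     "review",
--     # Non-research program/meeting records.
--     "meeting-report",
--     "conference-abstract",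
--     "proceedings",
-- ]
--
-- def _pubtype_is_excluded(pubtypes: List[Any]) -> bool:
--     for pt in pubtypes:
--         norm = str(pt).strip().lower().replace(" ", "-")
--         if not norm:
--             continue
--         for sub in _EXCLUDED_PUBTYPE_SUBSTRINGS:
--             if sub in norm:
--                 return True
--     return False
-- ===== SOURCE B (Python) =====
-- from typing import Any, List
--
-- _EXCLUDED_PUBTYPE_SUBSTRINGS: List[str] = [
--     "expression-of-concern",
--     "retraction",
--     "correction",
--     "erratum",
--     "corrigendum",
--     "withdrawn",
--     "comment",
--     "editorial",
--     "letter",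
--     "abstract",
--     "review",
--     "meeting-report",
--     "conference-abstract",
--     "proceedings",
-- ]
--
-- def _pubtype_is_excluded(pubtypes: List[Any]) -> bool:
--     # Build one newline-joined haystack of normalized pubtypes; no excluded
--     # substring contains a newline, so a match cannot cross entry boundaries.
--     haystack = "\n".join(str(pt).strip().lower().replace(" ", "-") for pt in pubtypes)
--     return any(sub in haystack for sub in _EXCLUDED_PUBTYPE_SUBSTRINGS)
-- ===== Notes on version B (the rewrite author's own statement) =====
-- stated objective: alternative
-- what changed: B joins all normalized pubtypes into one newline-separated haystack and runs each excluded substring once over it, instead of A's per-item inner scan over the substring list with early return; correctness rests on no excluded substring containing a newline.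
import Mathlib
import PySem

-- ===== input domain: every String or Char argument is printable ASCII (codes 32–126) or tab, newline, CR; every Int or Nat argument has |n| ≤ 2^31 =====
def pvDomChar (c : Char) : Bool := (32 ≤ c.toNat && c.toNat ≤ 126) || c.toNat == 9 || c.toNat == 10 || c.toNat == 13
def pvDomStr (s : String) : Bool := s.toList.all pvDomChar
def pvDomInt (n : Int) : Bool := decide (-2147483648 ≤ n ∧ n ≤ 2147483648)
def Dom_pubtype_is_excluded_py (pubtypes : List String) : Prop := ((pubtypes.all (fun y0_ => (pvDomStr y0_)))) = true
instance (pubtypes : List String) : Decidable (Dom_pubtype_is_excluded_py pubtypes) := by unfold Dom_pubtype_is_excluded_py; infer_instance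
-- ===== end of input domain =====

-- B builds one newline-joined haystack of normalized pubtypes and scans each excluded
-- substring once over it, instead of A's per-item inner loop; alternative structure, same result.


-- ===== PORT A =====
def pvExcludedSubs : List String :=
  ["expression-of-concern", "retraction", "correction", "erratum", "corrigendum",
   "withdrawn", "comment", "editorial", "letter", "abstract", "review",
   "meeting-report", "conference-abstract", "proceedings"]

-- str(pt).strip().lower().replace(" ", "-")
def pvNorm (pt : String) : String :=
  PySem.Str.replace (PySem.Str.lower (PySem.Str.strip pt)) " " "-"

-- inner 'for sub in _EXCLUDED_PUBTYPE_SUBSTRINGS: if sub in norm: return True'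
def pvInnerA (norm : String) : List String → Bool
  | [] => false
  | sub :: rest => if PySem.Str.isIn sub norm then true else pvInnerA norm rest

def pubtype_is_excluded_py (pubtypes : List String) : Bool :=
  match pubtypes with
  | [] => false
  | pt :: rest =>
    let norm := pvNorm pt
    if norm == "" then pubtype_is_excluded_py rest
    else if pvInnerA norm pvExcludedSubs then true else pubtype_is_excluded_py rest

-- ===== PORT B =====
def pubtype_is_excluded_py_alt (pubtypes : List String) : Bool :=
  let haystack := PySem.Str.join "\n" (pubtypes.map pvNorm)
  pvExcludedSubs.any (fun sub => PySem.Str.isIn sub haystack)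

-- ===== PRECONDITION & SPEC =====
def Spec_pubtype_is_excluded_py (pubtypes : List String) (out : Bool) : Prop := out = pubtype_is_excluded_py_alt pubtypes
instance (pubtypes : List String) (out : Bool) : Decidable (Spec_pubtype_is_excluded_py pubtypes out) := by unfold Spec_pubtype_is_excluded_py; infer_instance

-- ===== CLAIM (what is proved, stated in full; the proofs are below) =====
def Claim_equal_pubtype_is_excluded_py : Prop := ∀ (pubtypes : List String), Dom_pubtype_is_excluded_py pubtypes → Spec_pubtype_is_excluded_py pubtypes (pubtype_is_excluded_py pubtypes)

-- ===== LEMMAS AND PROOFS =====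

theorem pvStrIsIn_iff (sub s : String) :
    PySem.Str.isIn sub s = true ↔ sub.toList <:+: s.toList := by
  rw [PySem.Str.isIn_eq, PySem.Chars.isIn_iff_infix]

-- a prefix of u ++ '\n' :: v that avoids '\n' is a prefix of u
theorem pvPrefix_split (sub : List Char) (h : '\n' ∉ sub) :
    ∀ u v : List Char, sub <+: u ++ '\n' :: v → sub <+: u := by
  induction sub with
  | nil => intro u v _; exact List.nil_prefix
  | cons x s ih =>
    intro u v hp
    have hs : '\n' ∉ s := fun hm => h (List.mem_cons_of_mem _ hm)
    cases u with
    | nil =>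
      rcases hp with ⟨t, ht⟩
      simp at ht
      exact absurd (ht.1 ▸ List.mem_cons_self) h
    | cons y u' =>
      rcases hp with ⟨t, ht⟩
      simp at ht
      obtain ⟨rfl, ht2⟩ := ht
      exact (List.prefix_cons_inj x).mpr (ih hs u' v ⟨t, ht2⟩)

-- an infix of u ++ '\n' :: v that avoids '\n' is an infix of u or of v
theorem pvInfix_split (sub u v : List Char) (h : '\n' ∉ sub) :
    sub <:+: u ++ '\n' :: v ↔ sub <:+: u ∨ sub <:+: v := by
  constructor
  · intro hi
    induction u with
    | nil =>
      simp only [List.nil_append] at hi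
      rcases List.infix_cons_iff.mp hi with hp | hi'
      · have := pvPrefix_split sub h [] v hp
        left
        exact (List.prefix_nil.mp this) ▸ List.nil_infix
      · right; exact hi'
    | cons c u' ih =>
      rcases List.infix_cons_iff.mp hi with hp | hi'
      · left
        exact (pvPrefix_split sub h (c :: u') v hp).isInfix
      · rcases ih hi' with h1 | h2
        · left; exact h1.trans (List.suffix_cons c u').isInfix
        · right; exact h2
  · rintro (h1 | h2)
    · exact h1.trans ⟨[], '\n' :: v, by simp⟩
    · exact h2.trans ⟨u ++ ['\n'], [], by simp⟩

-- infix of a newline-join ↔ infix of some part (for nonempty newline-free sub)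
theorem pvInfix_join (sub : List Char) (parts : List (List Char))
    (h : '\n' ∉ sub) (hne : sub ≠ []) :
    sub <:+: PySem.Chars.join ['\n'] parts ↔ ∃ p ∈ parts, sub <:+: p := by
  induction parts with
  | nil =>
    simp [PySem.Chars.join_nil]
    intro hi
    exact hne hi
  | cons a l ih =>
    cases l with
    | nil => simp [PySem.Chars.join_singleton]
    | cons b l' =>
      rw [PySem.Chars.join_cons_cons]
      have heq : a ++ ['\n'] ++ PySem.Chars.join ['\n'] (b :: l')
           = a ++ '\n' :: PySem.Chars.join ['\n'] (b :: l') := by simp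
      rw [heq, pvInfix_split sub _ _ h, ih]
      simp only [List.mem_cons]
      constructor
      · rintro (ha | ⟨p, hp, hs⟩)
        · exact ⟨a, Or.inl rfl, ha⟩
        · exact ⟨p, Or.inr hp, hs⟩
      · rintro ⟨p, (rfl | hp), hs⟩
        · exact Or.inl hs
        · exact Or.inr ⟨p, hp, hs⟩

theorem pvSubs_ok : ∀ sub ∈ pvExcludedSubs, '\n' ∉ sub.toList ∧ sub.toList ≠ [] := by decide

-- A's inner loop is an 'any'
theorem pvInnerA_eq_any (norm : String) (subs : List String) :
    pvInnerA norm subs = subs.any (fun sub => PySem.Str.isIn sub norm) := by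
  induction subs with
  | nil => rfl
  | cons s rest ih =>
    rw [pvInnerA, ih]
    by_cases hs : PySem.Str.isIn s norm = true
    · rw [if_pos hs, List.any_cons, hs, Bool.true_or]
    · rw [if_neg hs, List.any_cons, (Bool.not_eq_true _).mp hs, Bool.false_or]

-- A = true ↔ some pubtype's normalization contains some excluded substring
theorem pvA_iff (pubtypes : List String) :
    pubtype_is_excluded_py pubtypes = true
      ↔ ∃ pt ∈ pubtypes, ∃ sub ∈ pvExcludedSubs, PySem.Str.isIn sub (pvNorm pt) = true := by
  induction pubtypes with
  | nil =>
    rw [show pubtype_is_excluded_py [] = false from rfl]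
    constructor
    · intro h; exact absurd h (by decide)
    · rintro ⟨pt, hpt, _⟩; exact absurd hpt (List.not_mem_nil)
  | cons pt rest ih =>
    rw [pubtype_is_excluded_py]
    split_ifs with hempty hfound
    · -- norm is empty: no nonempty substring is contained in it
      rw [ih]
      have he : pvNorm pt = "" := by simpa using hempty
      constructor
      · rintro ⟨q, hq, hs⟩; exact ⟨q, List.mem_cons_of_mem _ hq, hs⟩
      · rintro ⟨q, hq, sub, hsub, hin⟩
        rcases List.mem_cons.mp hq with rfl | hq'
        · exfalso
          have hinf := (pvStrIsIn_iff sub (pvNorm q)).mp hin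
          rw [he] at hinf
          simp at hinf
          exact (pvSubs_ok sub hsub).2 (hinf ▸ rfl)
        · exact ⟨q, hq', sub, hsub, hin⟩
    · -- inner loop found a match
      rw [pvInnerA_eq_any] at hfound
      rcases List.any_eq_true.mp hfound with ⟨sub, hsub, hin⟩
      simp only [true_iff]
      exact ⟨pt, List.mem_cons_self, sub, hsub, by simpa using hin⟩
    · -- no match in this pubtype
      rw [ih]
      rw [pvInnerA_eq_any] at hfound
      constructor
      · rintro ⟨q, hq, hs⟩; exact ⟨q, List.mem_cons_of_mem _ hq, hs⟩
      · rintro ⟨q, hq, sub, hsub, hin⟩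
        rcases List.mem_cons.mp hq with rfl | hq'
        · exact absurd (List.any_eq_true.mpr ⟨sub, hsub, by simpa using hin⟩) hfound
        · exact ⟨q, hq', sub, hsub, hin⟩

-- B = true ↔ the same condition (with the quantifiers swapped)
theorem pvB_iff (pubtypes : List String) :
    pubtype_is_excluded_py_alt pubtypes = true
      ↔ ∃ sub ∈ pvExcludedSubs, ∃ pt ∈ pubtypes, PySem.Str.isIn sub (pvNorm pt) = true := by
  unfold pubtype_is_excluded_py_alt
  rw [List.any_eq_true]
  constructor
  · rintro ⟨sub, hsub, hin⟩
    have hin' : PySem.Str.isIn sub (PySem.Str.join "\n" (pubtypes.map pvNorm)) = true := hin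
    have hinf := (pvStrIsIn_iff sub _).mp hin'
    rw [PySem.Str.toList_join] at hinf
    have hj := (pvInfix_join sub.toList ((pubtypes.map pvNorm).map String.toList)
        (pvSubs_ok sub hsub).1 (pvSubs_ok sub hsub).2).mp (by simpa using hinf)
    rcases hj with ⟨p, hp, hpin⟩
    rcases List.mem_map.mp hp with ⟨n, hn, rfl⟩
    rcases List.mem_map.mp hn with ⟨pt, hpt, rfl⟩
    exact ⟨sub, hsub, pt, hpt, (pvStrIsIn_iff sub (pvNorm pt)).mpr hpin⟩
  · rintro ⟨sub, hsub, pt, hpt, hin⟩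
    refine ⟨sub, hsub, ?_⟩
    have hinf := (pvStrIsIn_iff sub (pvNorm pt)).mp hin
    have hj : sub.toList <:+: PySem.Chars.join ['\n'] ((pubtypes.map pvNorm).map String.toList) := by
      rw [pvInfix_join sub.toList _ (pvSubs_ok sub hsub).1 (pvSubs_ok sub hsub).2]
      exact ⟨(pvNorm pt).toList, List.mem_map.mpr ⟨pvNorm pt, List.mem_map.mpr ⟨pt, hpt, rfl⟩, rfl⟩, hinf⟩
    have : PySem.Str.isIn sub (PySem.Str.join "\n" (pubtypes.map pvNorm)) = true := by
      rw [pvStrIsIn_iff, PySem.Str.toList_join]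
      simpa using hj
    simpa using this

-- ===== VERDICT (by name: the statement is the Claim_ definition above) =====
theorem pubtype_is_excluded_py_spec : Claim_equal_pubtype_is_excluded_py := by
  intro pubtypes _
  unfold Spec_pubtype_is_excluded_py
  rw [Bool.eq_iff_iff, pvA_iff, pvB_iff]
  constructor
  · rintro ⟨pt, hpt, sub, hsub, h⟩; exact ⟨sub, hsub, pt, hpt, h⟩
  · rintro ⟨sub, hsub, pt, hpt, h⟩; exact ⟨pt, hpt, sub, hsub, h⟩
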